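-- pv_equiv track=rewrite | github.com/ExP98/Teeworlds-DDNet-Statistics | Team_ranks_research/top10team_comparison.py | get_marked_top10
-- ===== SOURCE A (Python) =====
-- def get_marked_top10(team_members_time_list):
--     top10teams = []
--     curr_time = -1
--     rank = 0
--     time_was_equal = False
--     for itr, elem in enumerate(team_members_time_list):
--         if curr_time != elem[1]:
--             if time_was_equal:
--                 rank = itr + 1
--                 time_was_equal = False
--             else:
--                 rank += 1
--             if rank > 10:
--                 break
--             top10teams.append([rank, elem[0], elem[1]])
--             curr_time = elem[1]
--         else:
--             top10teams.append([rank, elem[0], elem[1]])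
--             time_was_equal = True
--     return top10teams
-- ===== SOURCE B (Python) =====
-- def get_marked_top10(team_members_time_list):
--     top10teams = []
--     pos = 0
--     n = len(team_members_time_list)
--     while pos < n:
--         rank = pos + 1
--         if rank > 10:
--             break
--         time = team_members_time_list[pos][1]
--         while pos < n and team_members_time_list[pos][1] == time:
--             top10teams.append([rank, team_members_time_list[pos][0], time])
--             pos += 1
--     return top10teams
-- ===== Notes on version B (the rewrite author's own statement) =====
-- stated objective: alternative
-- what changed: Replaces A's element-by-element loop with curr_time/rank/time_was_equal flag state by a run-grouping pass: an outer loop starting at each run boundary computes the rank directly as position+1 and an inner loop emits the whole run of equal times, with no tie flag and no incremental rank.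
-- intended difference: On lists whose first element has time -1, A's sentinel curr_time=-1 makes it treat the leading run as a tie continuation and give it rank 0, while B gives it the intended positional rank 1; rank 0 is an accident of the sentinel. — e.g. on get_marked_top10([("a", -1)]): A returns [(0, "a", -1)], B returns [(1, "a", -1)]
import Mathlib
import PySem

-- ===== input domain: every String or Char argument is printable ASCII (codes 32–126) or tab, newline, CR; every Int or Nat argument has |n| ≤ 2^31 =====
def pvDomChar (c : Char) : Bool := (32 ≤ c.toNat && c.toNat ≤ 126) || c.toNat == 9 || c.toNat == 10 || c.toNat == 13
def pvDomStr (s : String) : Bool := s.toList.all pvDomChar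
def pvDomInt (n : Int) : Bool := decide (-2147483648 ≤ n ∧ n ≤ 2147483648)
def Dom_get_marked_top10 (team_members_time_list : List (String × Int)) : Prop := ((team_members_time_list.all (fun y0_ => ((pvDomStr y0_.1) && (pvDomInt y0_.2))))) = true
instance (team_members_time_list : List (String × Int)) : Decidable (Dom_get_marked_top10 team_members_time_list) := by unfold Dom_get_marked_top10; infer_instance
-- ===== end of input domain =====

-- B replaces A's flag-driven single loop with a run-grouping pass (rank = run start position + 1);
-- on lists whose head time is -1 (A's sentinel value) the two differ, stated as D_ below.

-- ===== PORT A =====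
-- loop state: (itr, acc=top10teams, curr=curr_time, rank, teq=time_was_equal); break returns acc
def goA (suffix : List (String × Int)) (itr : Int) (acc : List (Int × String × Int))
    (curr rank : Int) (teq : Bool) : List (Int × String × Int) :=
  match suffix with
  | [] => acc
  | (name, t) :: rest =>
      if curr ≠ t then
        let rank' := if teq then itr + 1 else rank + 1
        if rank' > 10 then acc
        else goA rest (itr + 1) (acc ++ [(rank', name, t)]) t rank' false
      else goA rest (itr + 1) (acc ++ [(rank, name, t)]) curr rank true

def get_marked_top10 (team_members_time_list : List (String × Int)) : List (Int × String × Int) :=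
  goA team_members_time_list 0 [] (-1) 0 false

-- ===== PORT B =====
-- inner while loop of Source B: emit the run of elements whose time equals t; returns (acc, remaining suffix, pos)
def runB (suffix : List (String × Int)) (t rank pos : Int) (acc : List (Int × String × Int)) :
    List (Int × String × Int) × List (String × Int) × Int :=
  match suffix with
  | [] => (acc, [], pos)
  | (name, t') :: rest =>
      if t' = t then runB rest t rank (pos + 1) (acc ++ [(rank, name, t')])
      else (acc, (name, t') :: rest, pos)

theorem runB_rem_le (suffix : List (String × Int)) (t rank pos : Int)
    (acc : List (Int × String × Int)) : (runB suffix t rank pos acc).2.1.length ≤ suffix.length := by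
  induction suffix generalizing pos acc with
  | nil => simp [runB]
  | cons hd rest ih =>
      obtain ⟨name, t'⟩ := hd
      simp only [runB]
      split
      · exact le_trans (ih _ _) (by simp)
      · simp

-- outer while loop of Source B
def goB (suffix : List (String × Int)) (pos : Int) (acc : List (Int × String × Int)) :
    List (Int × String × Int) :=
  match suffix with
  | [] => acc
  | (name, t) :: rest =>
      if pos + 1 > 10 then acc
      else
        let r := runB rest t (pos + 1) (pos + 1) (acc ++ [(pos + 1, name, t)])
        goB r.2.1 r.2.2 r.1
termination_by suffix.length
decreasing_by
  exact Nat.lt_succ_of_le (runB_rem_le _ _ _ _ _)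

def get_marked_top10_alt (team_members_time_list : List (String × Int)) : List (Int × String × Int) :=
  goB team_members_time_list 0 []

-- ===== PRECONDITION & SPEC =====
-- On lists whose first element has time -1, A's sentinel curr_time=-1 makes it treat the leading
-- run as a tie continuation and give it rank 0, while B gives it the intended positional rank 1;
-- rank 0 is an accident of the sentinel.
def D_get_marked_top10 (team_members_time_list : List (String × Int)) : Prop :=
  (team_members_time_list.head?.map Prod.snd) = some (-1)
instance (team_members_time_list : List (String × Int)) : Decidable (D_get_marked_top10 team_members_time_list) := by unfold D_get_marked_top10; infer_instance

def Spec_get_marked_top10 (team_members_time_list : List (String × Int)) (out : List (Int × String × Int)) : Prop := ¬ D_get_marked_top10 team_members_time_list → out = get_marked_top10_alt team_members_time_list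
instance (team_members_time_list : List (String × Int)) (out : List (Int × String × Int)) : Decidable (Spec_get_marked_top10 team_members_time_list out) := by unfold Spec_get_marked_top10; infer_instance

def pvDiffWitness_get_marked_top10 : (List (String × Int)) := [("a", -1)]
def pvDiffWitnessOut_get_marked_top10 : (List (Int × String × Int)) × (List (Int × String × Int)) :=
  ([(0, "a", -1)], [(1, "a", -1)])

-- ===== CLAIM (what is proved, stated in full; the proofs are below) =====
def Claim_unchanged_get_marked_top10 : Prop := ∀ (team_members_time_list : List (String × Int)), Dom_get_marked_top10 team_members_time_list → Spec_get_marked_top10 team_members_time_list (get_marked_top10 team_members_time_list)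
def Claim_changed_get_marked_top10 : Prop := Dom_get_marked_top10 (pvDiffWitness_get_marked_top10) ∧ D_get_marked_top10 (pvDiffWitness_get_marked_top10) ∧ get_marked_top10 (pvDiffWitness_get_marked_top10) = pvDiffWitnessOut_get_marked_top10.1 ∧ get_marked_top10_alt (pvDiffWitness_get_marked_top10) = pvDiffWitnessOut_get_marked_top10.2 ∧ pvDiffWitnessOut_get_marked_top10.1 ≠ pvDiffWitnessOut_get_marked_top10.2
def Claim_exact_get_marked_top10 : Prop := ∀ (team_members_time_list : List (String × Int)), Dom_get_marked_top10 team_members_time_list → D_get_marked_top10 team_members_time_list → get_marked_top10 team_members_time_list ≠ get_marked_top10_alt team_members_time_list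

-- ===== LEMMAS AND PROOFS =====

-- A with the flag/incremental rank collapsed out: rank at a boundary at index itr is itr+1,
-- given the invariant (teq = false → rank = itr).
def goA2 (suffix : List (String × Int)) (itr : Int) (acc : List (Int × String × Int))
    (curr rank : Int) : List (Int × String × Int) :=
  match suffix with
  | [] => acc
  | (name, t) :: rest =>
      if curr ≠ t then
        if itr + 1 > 10 then acc
        else goA2 rest (itr + 1) (acc ++ [(itr + 1, name, t)]) t (itr + 1)
      else goA2 rest (itr + 1) (acc ++ [(rank, name, t)]) curr rank

theorem goA_eq_goA2 (suffix : List (String × Int)) (itr : Int) (acc : List (Int × String × Int))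
    (curr rank : Int) (teq : Bool) (h : teq = false → rank = itr) :
    goA suffix itr acc curr rank teq = goA2 suffix itr acc curr rank := by
  induction suffix generalizing itr acc curr rank teq with
  | nil => simp [goA, goA2]
  | cons hd rest ih =>
      obtain ⟨name, t⟩ := hd
      simp only [goA, goA2]
      have hrank : (if teq then itr + 1 else rank + 1) = itr + 1 := by
        cases teq with
        | false => simp [h rfl]
        | true => simp
      split
      · rw [hrank]
        split
        · rfl
        · exact ih _ _ _ _ _ (fun _ => rfl)
      · exact ih _ _ _ _ _ (by simp)

-- inner run: goA2 inside a run (curr = t) consumes exactly the elements runB consumes,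
-- with the same appends and the same position counter
theorem run_align (rest : List (String × Int)) (t rank : Int) : ∀ (itr : Int) (acc : List (Int × String × Int)),
    goA2 rest itr acc t rank =
      goA2 (runB rest t rank itr acc).2.1 (runB rest t rank itr acc).2.2 (runB rest t rank itr acc).1 t rank
    ∧ (∀ p ∈ (runB rest t rank itr acc).2.1.head?, p.2 ≠ t)
    ∧ (runB rest t rank itr acc).2.1.length ≤ rest.length := by
  induction rest with
  | nil => intro itr acc; refine ⟨rfl, by simp [runB], by simp [runB]⟩
  | cons hd r2 ih =>
      intro itr acc
      obtain ⟨name, t'⟩ := hd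
      by_cases h : t' = t
      · subst h
        have := ih (itr + 1) (acc ++ [(rank, name, t')])
        simp only [runB, if_true]
        refine ⟨?_, this.2.1, le_trans this.2.2 (by simp)⟩
        rw [← this.1]
        simp [goA2]
      · refine ⟨by simp only [runB, if_neg h], ?_, by simp only [runB, if_neg h]; exact le_refl _⟩
        simp only [runB, if_neg h]
        intro p hp
        simp at hp
        rw [← hp]
        exact h

-- outer alignment: at a run boundary (curr differs from the head time), the collapsed A equals B
theorem main_align : ∀ (n : ℕ) (suffix : List (String × Int)) (itr : Int)
    (acc : List (Int × String × Int)) (curr rank : Int), suffix.length ≤ n →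
    (∀ p ∈ suffix.head?, curr ≠ p.2) →
    goA2 suffix itr acc curr rank = goB suffix itr acc := by
  intro n
  induction n with
  | zero =>
      intro suffix itr acc curr rank hlen _
      have : suffix = [] := List.eq_nil_of_length_eq_zero (Nat.le_zero.mp hlen)
      subst this; simp [goA2, goB]
  | succ n ih =>
      intro suffix itr acc curr rank hlen hhd
      match suffix with
      | [] => simp [goA2, goB]
      | (name, t) :: rest =>
          have hne : curr ≠ t := hhd (name, t) rfl
          rw [goA2, goB]
          simp only [if_pos hne]
          split
          · rfl
          · have hrun := run_align rest t (itr + 1) (itr + 1) (acc ++ [(itr + 1, name, t)])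
            rw [hrun.1]
            exact ih _ _ _ _ _
              (le_trans hrun.2.2 (Nat.le_of_succ_le_succ hlen))
              (fun p hp => Ne.symm (hrun.2.1 p hp))

-- ===== VERDICT (by name: the statement is the Claim_ definition above) =====
theorem get_marked_top10_spec : Claim_unchanged_get_marked_top10 := by
  intro lst _hdom hnd
  unfold get_marked_top10 get_marked_top10_alt
  rw [goA_eq_goA2 _ _ _ _ _ _ (fun _ => rfl)]
  refine main_align lst.length lst 0 [] (-1) 0 (le_refl _) ?_
  intro p hp hqe
  exact hnd (by unfold D_get_marked_top10; rw [hp]; simp [← hqe])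

theorem get_marked_top10_changed : Claim_changed_get_marked_top10 := by
  unfold Claim_changed_get_marked_top10
  refine ⟨by decide, by decide, by decide, ?_, by decide⟩
  simp [get_marked_top10_alt, pvDiffWitness_get_marked_top10, pvDiffWitnessOut_get_marked_top10,
    goB, runB]

theorem goA_prefix : ∀ (suffix : List (String × Int)) (itr : Int) (acc : List (Int × String × Int))
    (curr rank : Int) (teq : Bool), ∃ s, goA suffix itr acc curr rank teq = acc ++ s := by
  intro suffix
  induction suffix with
  | nil => intro itr acc curr rank teq; exact ⟨[], by simp [goA]⟩
  | cons hd rest ih =>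
      intro itr acc curr rank teq
      obtain ⟨name, t⟩ := hd
      simp only [goA]
      split
      · set rk := if teq = true then itr + 1 else rank + 1 with hrk
        split
        · exact ⟨[], by simp⟩
        · obtain ⟨s, hs⟩ := ih (itr + 1) (acc ++ [(rk, name, t)]) t rk false
          exact ⟨(rk, name, t) :: s, by rw [hs]; simp⟩
      · obtain ⟨s, hs⟩ := ih (itr + 1) (acc ++ [(rank, name, t)]) curr rank true
        exact ⟨(rank, name, t) :: s, by rw [hs]; simp⟩

theorem runB_prefix : ∀ (suffix : List (String × Int)) (t rank pos : Int)
    (acc : List (Int × String × Int)), ∃ s, (runB suffix t rank pos acc).1 = acc ++ s := by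
  intro suffix
  induction suffix with
  | nil => intro t rank pos acc; exact ⟨[], by simp [runB]⟩
  | cons hd rest ih =>
      intro t rank pos acc
      obtain ⟨name, t'⟩ := hd
      simp only [runB]
      split
      · obtain ⟨s, hs⟩ := ih t rank (pos + 1) (acc ++ [(rank, name, t')])
        exact ⟨(rank, name, t') :: s, by rw [hs]; simp⟩
      · exact ⟨[], by simp⟩

theorem goB_prefix : ∀ (n : ℕ) (suffix : List (String × Int)) (pos : Int)
    (acc : List (Int × String × Int)), suffix.length ≤ n → ∃ s, goB suffix pos acc = acc ++ s := by
  intro n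
  induction n with
  | zero =>
      intro suffix pos acc hlen
      have : suffix = [] := List.eq_nil_of_length_eq_zero (Nat.le_zero.mp hlen)
      subst this; exact ⟨[], by simp [goB]⟩
  | succ n ih =>
      intro suffix pos acc hlen
      match suffix with
      | [] => exact ⟨[], by simp [goB]⟩
      | (name, t) :: rest =>
          rw [goB]
          split
          · exact ⟨[], by simp⟩
          · obtain ⟨s1, h1⟩ := runB_prefix rest t (pos + 1) (pos + 1) (acc ++ [(pos + 1, name, t)])
            obtain ⟨s2, h2⟩ := ih (runB rest t (pos + 1) (pos + 1) (acc ++ [(pos + 1, name, t)])).2.1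
              (runB rest t (pos + 1) (pos + 1) (acc ++ [(pos + 1, name, t)])).2.2
              (runB rest t (pos + 1) (pos + 1) (acc ++ [(pos + 1, name, t)])).1
              (le_trans (runB_rem_le _ _ _ _ _) (Nat.le_of_succ_le_succ hlen))
            exact ⟨(pos + 1, name, t) :: (s1 ++ s2), by rw [h2, h1]; simp⟩

theorem get_marked_top10_tight : Claim_exact_get_marked_top10 := by
  intro lst _hdom hD
  cases lst with
  | nil => simp [D_get_marked_top10] at hD
  | cons hd rest =>
      obtain ⟨name, t⟩ := hd
      have ht : t = -1 := by simpa [D_get_marked_top10] using hD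
      subst ht
      obtain ⟨sA, hA⟩ := goA_prefix rest 1 [(0, name, -1)] (-1) 0 true
      obtain ⟨s1, h1⟩ := runB_prefix rest (-1) 1 1 [(1, name, -1)]
      obtain ⟨s2, h2⟩ := goB_prefix (runB rest (-1) 1 1 [(1, name, -1)]).2.1.length
        (runB rest (-1) 1 1 [(1, name, -1)]).2.1
        (runB rest (-1) 1 1 [(1, name, -1)]).2.2
        (runB rest (-1) 1 1 [(1, name, -1)]).1 (le_refl _)
      have hAe : get_marked_top10 ((name, -1) :: rest) = (0, name, -1) :: sA := by
        unfold get_marked_top10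
        simp only [goA, ne_eq, not_true_eq_false, if_false, List.nil_append, ite_self]
        simpa using hA
      have hBe : get_marked_top10_alt ((name, -1) :: rest) = (1, name, -1) :: (s1 ++ s2) := by
        unfold get_marked_top10_alt
        rw [goB]
        simp only [List.nil_append]
        rw [if_neg (by norm_num)]
        simp only [show (0 : Int) + 1 = 1 from rfl]
        rw [h2, h1]
        simp
      rw [hAe, hBe]
      intro h
      simp at h
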